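-- pv_equiv track=rewrite | github.com/sangderenard/speaktome | AGENTS/tools/header_utils.py | extract_header_import_block
-- ===== SOURCE A (Python) =====
-- HEADER_END = "# --- END HEADER ---"
--
-- def extract_header_import_block(lines: list[str]) -> list[str]:
--     """Return lines from the first import to the header end sentinel."""
--     try:
--         start = next(
--             i for i, ln in enumerate(lines) if ln.strip().startswith(("import", "from "))
--         )
--     except StopIteration:
--         return []
--     try:
--         end = next(i for i, ln in enumerate(lines) if ln.strip() == HEADER_END)
--     except StopIteration:
--         end = len(lines)
--     return lines[start:end]
-- ===== SOURCE B (Python) =====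
-- HEADER_END = "# --- END HEADER ---"
--
-- def extract_header_import_block(lines):
--     """Walk a single iterator: skip to the first import line, then collect
--     lines directly until the sentinel; no indices, no slicing."""
--     it = iter(lines)
--     for ln in it:
--         s = ln.strip()
--         if s == HEADER_END:
--             return []
--         if s.startswith(("import", "from ")):
--             out = [ln]
--             for ln2 in it:
--                 if ln2.strip() == HEADER_END:
--                     break
--                 out.append(ln2)
--             return out
--     return []
-- ===== Notes on version B (the rewrite author's own statement) =====
-- stated objective: alternative
-- what changed: A computes two indices with separate enumerate scans and slices; B never computes an index: it walks one iterator, returning an empty result if the sentinel or the end of input is reached before an import line, and otherwise accumulating the lines directly until the sentinel.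
import Mathlib
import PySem

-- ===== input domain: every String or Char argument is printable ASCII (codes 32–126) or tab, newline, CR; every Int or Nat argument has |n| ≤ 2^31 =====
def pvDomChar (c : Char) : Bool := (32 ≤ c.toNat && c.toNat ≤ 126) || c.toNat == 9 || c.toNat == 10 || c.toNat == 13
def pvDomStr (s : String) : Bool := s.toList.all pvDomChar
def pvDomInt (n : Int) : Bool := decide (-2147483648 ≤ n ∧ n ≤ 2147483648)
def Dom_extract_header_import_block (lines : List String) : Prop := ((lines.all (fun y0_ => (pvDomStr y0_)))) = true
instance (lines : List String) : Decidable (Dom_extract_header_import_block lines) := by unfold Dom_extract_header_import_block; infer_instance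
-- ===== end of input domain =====

-- ===== PORT A =====
-- B walks one iterator accumulating lines directly (no indices, no slice),
-- instead of A's two index-finding scans plus a slice; objective: alternative.
def pvHeaderEnd : String := "# --- END HEADER ---"

-- A's 'next(i for i, ln in enumerate(lines) if p(ln))': scan with a counter.
def pvFindA (p : String → Bool) : List String → Int → Option Int
  | [], _ => none
  | ln :: rest, i => if p ln then some i else pvFindA p rest (i + 1)

def pvIsImport (ln : String) : Bool :=
  PySem.Str.startswith (PySem.Str.strip ln) "import" ||
    PySem.Str.startswith (PySem.Str.strip ln) "from "

def pvIsEnd (ln : String) : Bool := PySem.Str.strip ln == pvHeaderEnd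

def extract_header_import_block (lines : List String) : List String :=
  match pvFindA pvIsImport lines 0 with
  | none => []
  | some start =>
    let e : Int := (pvFindA pvIsEnd lines 0).getD (lines.length : Int)
    PySem.List.slice lines (some start) (some e)

-- ===== PORT B =====
-- B's inner 'for ln2 in it: if sentinel: break; out.append(ln2)'.
def pvCollectB : List String → List String
  | [] => []
  | ln :: rest => if pvIsEnd ln then [] else ln :: pvCollectB rest

-- B's outer loop over the same iterator.
def extract_header_import_block_alt : List String → List String
  | [] => []
  | ln :: rest =>
    if pvIsEnd ln then []
    else if pvIsImport ln then ln :: pvCollectB rest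
    else extract_header_import_block_alt rest

-- ===== PRECONDITION & SPEC =====
def Spec_extract_header_import_block (lines : List String) (out : List String) : Prop := out = extract_header_import_block_alt lines
instance (lines : List String) (out : List String) : Decidable (Spec_extract_header_import_block lines out) := by unfold Spec_extract_header_import_block; infer_instance

-- ===== CLAIM (what is proved, stated in full; the proofs are below) =====
def Claim_equal_extract_header_import_block : Prop := ∀ (lines : List String), Dom_extract_header_import_block lines → Spec_extract_header_import_block lines (extract_header_import_block lines)

-- ===== LEMMAS AND PROOFS =====
-- index-free restatement of A, at the Nat level
def pvA' (lines : List String) : List String :=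
  match lines.findIdx? pvIsImport with
  | none => []
  | some s => (lines.drop s).take (((lines.findIdx? pvIsEnd).getD lines.length) - s)

-- clean form of List.findIdx?_cons
lemma pvFindIdx_cons (p : String → Bool) (a : String) (l : List String) :
    (a :: l).findIdx? p = if p a then some 0 else (l.findIdx? p).map (· + 1) := by
  by_cases h : p a <;>
    simp [List.findIdx?_cons, h, Option.map_map, Option.bind_eq_bind] <;>
    cases l.findIdx? p <;> simp [Option.map_map]

lemma pvFindA_map (p : String → Bool) (l : List String) (i : Int) :
    pvFindA p l i = (l.findIdx? p).map (fun (k : Nat) => i + (k : Int)) := by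
  induction l generalizing i with
  | nil => simp [pvFindA]
  | cons a l ih =>
    rw [pvFindA, pvFindIdx_cons]
    by_cases h : p a
    · simp [h]
    · simp only [h, if_false, ih, Option.map_map]
      cases l.findIdx? p <;> simp <;> ring

-- A's two Int scans + slice compute pvA'
lemma pvA_eq (lines : List String) : extract_header_import_block lines = pvA' lines := by
  unfold extract_header_import_block pvA'
  rw [pvFindA_map pvIsImport lines 0, pvFindA_map pvIsEnd lines 0]
  cases hs : lines.findIdx? pvIsImport with
  | none => simp
  | some s =>
    cases he : lines.findIdx? pvIsEnd with
    | none =>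
      simp only [Option.map_some, Option.map_none, Option.getD_none, zero_add]
      rw [show ((lines.length : Int)) = ((lines.length : Nat) : Int) by norm_num,
        PySem.List.slice_natCast]
    | some e =>
      simp only [Option.map_some, Option.getD_some, zero_add]
      rw [PySem.List.slice_natCast]

lemma pvEnd_not_import (ln : String) (h : pvIsEnd ln = true) : pvIsImport ln = false := by
  simp only [pvIsEnd, beq_iff_eq] at h
  simp [pvIsImport, h, pvHeaderEnd]
  constructor <;> decide

lemma pvCollectB_eq (l : List String) :
    pvCollectB l = l.take ((l.findIdx? pvIsEnd).getD l.length) := by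
  induction l with
  | nil => simp [pvCollectB]
  | cons a l ih =>
    rw [pvCollectB, pvFindIdx_cons]
    by_cases h : pvIsEnd a
    · simp [h]
    · simp only [h, if_false, ih]
      cases l.findIdx? pvIsEnd <;> simp

lemma pvMain (lines : List String) :
    extract_header_import_block lines = extract_header_import_block_alt lines := by
  rw [pvA_eq]
  induction lines with
  | nil => rfl
  | cons ln rest ih =>
    unfold pvA' extract_header_import_block_alt
    rw [pvFindIdx_cons, pvFindIdx_cons]
    by_cases he : pvIsEnd ln
    · -- sentinel first: the slice is empty, so is B's result
      rw [pvEnd_not_import ln he]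
      simp only [he, if_true, if_false, Option.getD_some]
      cases h : rest.findIdx? pvIsImport <;> simp [h]
    · by_cases hi : pvIsImport ln
      · -- import first: B collects the lines from rest up to the sentinel
        simp only [hi, he, if_true, if_false, Option.map_some, List.drop_zero]
        rw [pvCollectB_eq]
        cases h : rest.findIdx? pvIsEnd with
        | none => simp
        | some e => simp [Nat.succ_sub_succ]
      · -- neither: both sides step to rest
        simp only [hi, he, if_false]
        rw [← ih]
        unfold pvA'
        cases h : rest.findIdx? pvIsImport with
        | none => simp
        | some k =>
          simp only [Option.map_some, Option.getD_some]
          cases h2 : rest.findIdx? pvIsEnd with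
          | none => simp [Nat.succ_sub_succ]
          | some m => simp [Nat.succ_sub_succ]

-- ===== VERDICT (by name: the statement is the Claim_ definition above) =====
theorem extract_header_import_block_spec : Claim_equal_extract_header_import_block := by
  intro lines _
  unfold Spec_extract_header_import_block
  exact pvMain lines
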